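-- pv_equiv track=rewrite | github.com/mbmarcin/break_trend | break_trend.py | check_empty_months
-- ===== SOURCE A (Python) =====
-- def check_empty_months(series):
--
--     qty_empty_mth = list()
--     i = 0
--     list_ = list(series[::-1])
--     while i < len(series[::-1]) - 1:
--         if list_[i] == 0:
--             qty_empty_mth.append(1)
--             i += 1
--         else:
--             break
--     return len(qty_empty_mth)
-- ===== SOURCE B (Python) =====
-- def check_empty_months(series):
--     count = 0
--     for x in series[1:]:
--         count = count + 1 if x == 0 else 0
--     return count
-- ===== Notes on version B (the rewrite author's own statement) =====
-- stated objective: simpler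
-- what changed: Replaces the reverse-copy + indexed while-loop with break and an appended marker list by a single forward pass over series[1:] keeping an integer counter that resets on non-zero elements; series[1:] reproduces A's len-1 cap naturally.
import Mathlib
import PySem

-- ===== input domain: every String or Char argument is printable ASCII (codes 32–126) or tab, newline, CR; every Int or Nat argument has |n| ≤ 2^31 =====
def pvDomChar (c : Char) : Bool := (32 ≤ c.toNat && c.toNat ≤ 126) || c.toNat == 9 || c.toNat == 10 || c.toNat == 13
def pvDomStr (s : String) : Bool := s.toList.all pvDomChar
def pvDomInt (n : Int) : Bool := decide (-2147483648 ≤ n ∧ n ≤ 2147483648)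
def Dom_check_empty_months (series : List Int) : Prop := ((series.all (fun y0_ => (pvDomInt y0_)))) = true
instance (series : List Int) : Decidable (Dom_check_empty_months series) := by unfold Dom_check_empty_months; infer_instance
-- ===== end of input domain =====

-- B replaces A's reverse-copy + indexed while-loop (break on non-zero) by one forward
-- pass over series[1:] with a counter reset on non-zero elements (objective: simpler).


-- ===== PORT A =====
-- A's while-loop: scan list_ from index 0, at most (len series - 1) steps (the
-- 'i < len(series[::-1]) - 1' bound), appending 1 while the element is 0, break otherwise;
-- the result is the number of appended markers.
def pvALoop : List Int → Nat → Nat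
  | _, 0 => 0
  | [], _ + 1 => 0
  | x :: xs, k + 1 => if x = 0 then pvALoop xs k + 1 else 0

def check_empty_months (series : List Int) : Int :=
  let list_ : List Int := series.reverse   -- series[::-1] (PySem.List.slice?_none_none_neg_one)
  ((pvALoop list_ (series.length - 1) : Nat) : Int)

-- ===== PORT B =====
def check_empty_months_alt (series : List Int) : Int :=
  (PySem.List.slice series (some 1) none).foldl
    (fun count x => if x = 0 then count + 1 else 0) 0

-- ===== PRECONDITION & SPEC =====
def Spec_check_empty_months (series : List Int) (out : Int) : Prop := out = check_empty_months_alt series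
instance (series : List Int) (out : Int) : Decidable (Spec_check_empty_months series out) := by unfold Spec_check_empty_months; infer_instance

-- ===== CLAIM (what is proved, stated in full; the proofs are below) =====
def Claim_equal_check_empty_months : Prop := ∀ (series : List Int), Dom_check_empty_months series → Spec_check_empty_months series (check_empty_months series)

-- ===== LEMMAS AND PROOFS =====

-- leading-zero run length of a list
def pvLeadZ : List Int → Nat
  | [] => 0
  | x :: xs => if x = 0 then pvLeadZ xs + 1 else 0

-- A's bounded loop counts the leading zeros of the first k elements
theorem pvALoop_eq_leadZ_take (l : List Int) (k : Nat) :
    pvALoop l k = pvLeadZ (l.take k) := by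
  induction l generalizing k with
  | nil => cases k <;> simp [pvALoop, pvLeadZ]
  | cons x xs ih =>
    cases k with
    | zero => simp [pvALoop, pvLeadZ]
    | succ k => simp [pvALoop, pvLeadZ, ih]

-- B's reset-counter fold computes the leading-zero run of the reversed list
theorem pvFold_eq_leadZ_reverse (l : List Int) :
    l.foldl (fun count x => if x = 0 then count + 1 else 0) (0 : Int)
      = (pvLeadZ l.reverse : Int) := by
  induction l using List.reverseRecOn with
  | nil => simp [pvLeadZ]
  | append_singleton l x ih =>
    rw [List.foldl_append]
    simp only [List.foldl, List.reverse_append, List.reverse_singleton,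
      List.singleton_append, pvLeadZ, ih]
    split_ifs
    · push_cast; ring
    · rfl

theorem pvTail_reverse (l : List Int) :
    l.tail.reverse = l.reverse.take (l.length - 1) := by
  cases l with
  | nil => simp
  | cons x xs =>
    simp only [List.tail_cons, List.reverse_cons, List.length_cons,
      Nat.add_sub_cancel]
    rw [← List.length_reverse (as := xs), List.take_left]

-- ===== VERDICT (by name: the statement is the Claim_ definition above) =====
theorem check_empty_months_spec : Claim_equal_check_empty_months := by
  intro series _
  unfold Spec_check_empty_months check_empty_months check_empty_months_alt
  rw [PySem.List.slice_from_one, pvFold_eq_leadZ_reverse, pvTail_reverse]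
  simp only [pvALoop_eq_leadZ_take]
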